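-- pv_equiv track=rewrite | github.com/ajay-1110/Python-Coderbyte-Challenges | String Challenges/tripple_double.py | trippledouble
-- ===== SOURCE A (Python) =====
-- def trippledouble(num1,num2):
--     num1str = str(num1)
--     num2str = str(num2)
--     x = []
--     y = []
--     for i in set(num1str):
--         x.append(i*3)
--     for i in set(num2str):
--         y.append(i*2)
--     for i in x:
--         for j in y:
--             if i[0] == j[0]:
--                 if i in num1str and j in num2str:
--                     return True
--     return False
-- ===== SOURCE B (Python) =====
-- def trippledouble(num1, num2):
--     s1, s2 = str(num1), str(num2)
--     triples = {a for a, b, c in zip(s1, s1[1:], s1[2:]) if a == b == c}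
--     doubles = {a for a, b in zip(s2, s2[1:]) if a == b}
--     return not triples.isdisjoint(doubles)
-- ===== Notes on version B (the rewrite author's own statement) =====
-- stated objective: simpler
-- what changed: Replaces A's nested loops over candidate tripled/doubled strings with substring-membership tests by two single zip-based passes collecting the characters of adjacent equal triples/pairs into sets and testing the sets for a common element.
import Mathlib
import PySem

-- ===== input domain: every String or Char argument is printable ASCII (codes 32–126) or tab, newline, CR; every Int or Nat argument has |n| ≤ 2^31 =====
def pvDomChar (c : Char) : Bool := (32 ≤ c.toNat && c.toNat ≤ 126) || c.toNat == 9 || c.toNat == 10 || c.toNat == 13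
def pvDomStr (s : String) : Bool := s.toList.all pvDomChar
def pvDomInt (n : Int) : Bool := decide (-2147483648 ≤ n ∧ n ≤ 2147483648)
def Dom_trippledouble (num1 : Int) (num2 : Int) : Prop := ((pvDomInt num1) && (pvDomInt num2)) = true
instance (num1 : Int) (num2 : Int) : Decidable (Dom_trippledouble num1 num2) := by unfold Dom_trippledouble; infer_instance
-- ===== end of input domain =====

-- B replaces A's candidate-substring nested loops by single zip-based passes collecting the
-- run characters into two sets and testing them for a common element (objective: simpler).

-- ===== PORT A =====
-- A iterates over set(num1str)/set(num2str); the Bool result is order-independent (an 'any'),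
-- so iterating the PySem.Set in insertion order is exact.
def trippledouble (num1 : Int) (num2 : Int) : Bool :=
  let num1str := PySem.Int.toChars num1
  let num2str := PySem.Int.toChars num2
  let x := (PySem.Set.ofList num1str).map (fun i => [i, i, i])
  let y := (PySem.Set.ofList num2str).map (fun i => [i, i])
  x.any (fun i => y.any (fun j =>
    if PySem.List.pyGetD i 0 ' ' == PySem.List.pyGetD j 0 ' ' then
      PySem.Chars.isIn i num1str && PySem.Chars.isIn j num2str
    else false))

-- ===== PORT B =====
def trippledouble_alt (num1 : Int) (num2 : Int) : Bool :=
  let s1 := PySem.Int.toChars num1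
  let s2 := PySem.Int.toChars num2
  let triples := PySem.Set.ofList
    ((((s1.zip (s1.drop 1)).zip (s1.drop 2)).filter
        (fun p => p.1.1 == p.1.2 && p.1.2 == p.2)).map (fun p => p.1.1))
  let doubles := PySem.Set.ofList
    (((s2.zip (s2.drop 1)).filter (fun p => p.1 == p.2)).map (fun p => p.1))
  !(PySem.Set.isdisjoint triples doubles)

-- ===== PRECONDITION & SPEC =====
def Spec_trippledouble (num1 : Int) (num2 : Int) (out : Bool) : Prop := out = trippledouble_alt num1 num2
instance (num1 : Int) (num2 : Int) (out : Bool) : Decidable (Spec_trippledouble num1 num2 out) := by unfold Spec_trippledouble; infer_instance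

-- ===== CLAIM (what is proved, stated in full; the proofs are below) =====
def Claim_equal_trippledouble : Prop := ∀ (num1 : Int) (num2 : Int), Dom_trippledouble num1 num2 → Spec_trippledouble num1 num2 (trippledouble num1 num2)

-- ===== LEMMAS AND PROOFS =====

-- a char appears in B's zip-of-three pass iff its triple is an infix of the string
theorem pv_triple_mem (s : List Char) (c : Char) :
    c ∈ (((s.zip (s.drop 1)).zip (s.drop 2)).filter
        (fun p => p.1.1 == p.1.2 && p.1.2 == p.2)).map (fun p => p.1.1)
      ↔ [c, c, c] <:+: s := by
  induction s with
  | nil => simp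
  | cons a t ih =>
    cases t with
    | nil =>
      exact iff_of_false (by simp) (fun h => by have := h.length_le; simp at this)
    | cons b u =>
      cases u with
      | nil =>
        exact iff_of_false (by simp) (fun h => by have := h.length_le; simp at this)
      | cons d v =>
        simp only [List.drop, List.zip_cons_cons, List.filter_cons, List.infix_cons_iff] at *
        by_cases hab : ((a == b && (b == d)) = true)
        · rw [if_pos hab]
          simp only [List.map_cons, List.mem_cons]
          rw [ih]
          obtain ⟨h1, h2⟩ : a = b ∧ b = d := by simpa using hab
          constructor
          · rintro (rfl | h)
            · left; subst h1; subst h2; simp [List.cons_prefix_cons]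
            · right; exact h
          · rintro (h | h)
            · left; exact (List.cons_prefix_cons.mp h).1
            · right; exact h
        · rw [if_neg hab, ih]
          constructor
          · intro h; right; exact h
          · rintro (h | h)
            · exfalso
              rcases List.cons_prefix_cons.mp h with ⟨e1, h⟩
              rcases List.cons_prefix_cons.mp h with ⟨e2, h⟩
              rcases List.cons_prefix_cons.mp h with ⟨e3, _⟩
              exact hab (by simp [← e1, ← e2, ← e3])
            · exact h

-- a char appears in B's zip-of-two pass iff its double is an infix of the string
theorem pv_double_mem (s : List Char) (c : Char) :
    c ∈ ((s.zip (s.drop 1)).filter (fun p => p.1 == p.2)).map (fun p => p.1)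
      ↔ [c, c] <:+: s := by
  induction s with
  | nil => simp
  | cons a t ih =>
    cases t with
    | nil =>
      exact iff_of_false (by simp) (fun h => by have := h.length_le; simp at this)
    | cons b u =>
      simp only [List.drop, List.zip_cons_cons, List.filter_cons, List.infix_cons_iff] at *
      by_cases hab : ((a == b) = true)
      · rw [if_pos hab]
        simp only [List.map_cons, List.mem_cons]
        rw [ih]
        have h1 : a = b := by simpa using hab
        constructor
        · rintro (rfl | h)
          · left; subst h1; simp [List.cons_prefix_cons]
          · right; exact h
        · rintro (h | h)
          · left; exact (List.cons_prefix_cons.mp h).1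
          · right; exact h
      · rw [if_neg hab, ih]
        constructor
        · intro h; right; exact h
        · rintro (h | h)
          · exfalso
            rcases List.cons_prefix_cons.mp h with ⟨e1, h⟩
            rcases List.cons_prefix_cons.mp h with ⟨e2, _⟩
            exact hab (by simp [← e1, ← e2])
          · exact h

-- characterisation of A's nested-loop answer
theorem pv_A_iff (num1 num2 : Int) :
    trippledouble num1 num2 = true ↔
      ∃ c, [c, c, c] <:+: PySem.Int.toChars num1 ∧ [c, c] <:+: PySem.Int.toChars num2 := by
  unfold trippledouble
  simp only [List.any_eq_true, List.mem_map]
  constructor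
  · rintro ⟨i, ⟨cA, hcA, rfl⟩, j, ⟨cB, hcB, rfl⟩, h⟩
    simp [PySem.List.pyGetD, PySem.List.pyGet?, PySem.List.pyIdx?] at h
    obtain ⟨rfl, h1, h2⟩ := h
    exact ⟨cA, (PySem.Chars.isIn_iff_infix _ _).mp h1, (PySem.Chars.isIn_iff_infix _ _).mp h2⟩
  · rintro ⟨c, h1, h2⟩
    have hc1 : c ∈ PySem.Int.toChars num1 := h1.subset (by simp)
    have hc2 : c ∈ PySem.Int.toChars num2 := h2.subset (by simp)
    refine ⟨[c, c, c], ⟨c, ?_, rfl⟩, [c, c], ⟨c, ?_, rfl⟩, ?_⟩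
    · simpa [PySem.Set.mem_ofList] using hc1
    · simpa [PySem.Set.mem_ofList] using hc2
    · simp [PySem.List.pyGetD, PySem.List.pyGet?, PySem.List.pyIdx?,
        (PySem.Chars.isIn_iff_infix _ _).mpr h1, (PySem.Chars.isIn_iff_infix _ _).mpr h2]

-- characterisation of B's answer
theorem pv_B_iff (num1 num2 : Int) :
    trippledouble_alt num1 num2 = true ↔
      ∃ c, [c, c, c] <:+: PySem.Int.toChars num1 ∧ [c, c] <:+: PySem.Int.toChars num2 := by
  simp only [trippledouble_alt, Bool.not_eq_true']
  rw [Bool.eq_false_iff, Ne, PySem.Set.isdisjoint_iff]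
  push Not
  constructor
  · rintro ⟨c, hc1, hc2⟩
    simp only [PySem.Set.mem_ofList] at hc1 hc2
    exact ⟨c, (pv_triple_mem _ c).mp hc1, (pv_double_mem _ c).mp hc2⟩
  · rintro ⟨c, hc1, hc2⟩
    refine ⟨c, ?_, ?_⟩ <;> simp only [PySem.Set.mem_ofList]
    · exact (pv_triple_mem _ c).mpr hc1
    · exact (pv_double_mem _ c).mpr hc2

-- ===== VERDICT (by name: the statement is the Claim_ definition above) =====
theorem trippledouble_spec : Claim_equal_trippledouble := by
  intro num1 num2 _
  unfold Spec_trippledouble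
  rw [Bool.eq_iff_iff, pv_A_iff, pv_B_iff]
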